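-- pv_equiv track=rewrite | github.com/JohnL4/Markovian-text | markovian-text.py | prefixesFromDeque
-- ===== SOURCE A (Python) =====
-- import argparse, collections, random
--
-- def prefixesFromDeque( aDequeOfChars: collections.deque) -> [str]:
--    """
--    A list of prefixes from the given deque, including the last char.  Prefixes are built from the right, so if the
--    current deque is ['a','b','c'], the returned prefixes will be ['', 'c', 'bc', 'abc'].
--    """
--    retval = []
--    for i in range( len( aDequeOfChars) + 1):
--       pfx = ""
--       for j in range(i):
--          pfx = aDequeOfChars[ -j - 1 ] + pfx
--       retval.append( pfx)
--    return retval
-- ===== SOURCE B (Python) =====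
-- def prefixesFromDeque(aDequeOfChars):
--     """One right-to-left pass: grow the suffix string incrementally instead of
--     rebuilding each prefix from scratch with a nested loop."""
--     retval = ['']
--     pfx = ''
--     for c in reversed(aDequeOfChars):
--         pfx = c + pfx
--         retval.append(pfx)
--     return retval
-- ===== Notes on version B (the rewrite author's own statement) =====
-- stated objective: faster
-- what changed: B replaces A's nested loops (rebuilding every prefix character-by-character from scratch) with a single reversed pass that grows one accumulator string and appends each intermediate value.
import Mathlib
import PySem

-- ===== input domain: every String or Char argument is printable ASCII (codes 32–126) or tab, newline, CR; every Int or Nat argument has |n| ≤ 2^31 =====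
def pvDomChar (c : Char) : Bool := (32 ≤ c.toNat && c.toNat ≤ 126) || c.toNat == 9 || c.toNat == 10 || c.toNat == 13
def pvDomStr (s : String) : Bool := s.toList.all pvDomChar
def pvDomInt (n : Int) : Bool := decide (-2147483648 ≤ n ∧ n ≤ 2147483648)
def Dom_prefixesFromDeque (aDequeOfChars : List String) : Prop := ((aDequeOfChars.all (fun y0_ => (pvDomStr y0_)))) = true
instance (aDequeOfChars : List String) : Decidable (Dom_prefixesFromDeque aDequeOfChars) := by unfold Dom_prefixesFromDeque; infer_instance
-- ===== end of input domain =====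

-- B replaces A's nested loops with one reversed pass growing an accumulator string.

-- ===== PORT A =====
def prefixesFromDeque (aDequeOfChars : List String) : List String :=
  (PySem.List.pyRange 0 ((aDequeOfChars.length : Int) + 1) 1).foldl
    (fun retval i =>
      retval ++ [(PySem.List.pyRange 0 i 1).foldl
        (fun pfx j => PySem.List.pyGetD aDequeOfChars (-j - 1) "" ++ pfx) ""])
    []

-- ===== PORT B =====
def prefixesFromDeque_alt (aDequeOfChars : List String) : List String :=
  (aDequeOfChars.reverse.foldl
    (fun (st : List String × String) c => (st.1 ++ [c ++ st.2], c ++ st.2))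
    ([""], "")).1

-- ===== PRECONDITION & SPEC =====
def Spec_prefixesFromDeque (aDequeOfChars : List String) (out : List String) : Prop := out = prefixesFromDeque_alt aDequeOfChars
instance (aDequeOfChars : List String) (out : List String) : Decidable (Spec_prefixesFromDeque aDequeOfChars out) := by unfold Spec_prefixesFromDeque; infer_instance

-- ===== CLAIM (what is proved, stated in full; the proofs are below) =====
def Claim_equal_prefixesFromDeque : Prop := ∀ (aDequeOfChars : List String), Dom_prefixesFromDeque aDequeOfChars → Spec_prefixesFromDeque aDequeOfChars (prefixesFromDeque aDequeOfChars)

-- ===== LEMMAS AND PROOFS =====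

/-- join by foldr -/
def pvJoin (L : List String) : String := L.foldr (· ++ ·) ""

/-- the sequence of values B's accumulator takes, front to back -/
def pvAux : List String → String → List String
  | [], _ => []
  | x :: xs, p => (x ++ p) :: pvAux xs (x ++ p)

theorem pvJoin_append_singleton (a : List String) (x : String) :
    pvJoin (a ++ [x]) = pvJoin a ++ x := by
  induction a with
  | nil => simp [pvJoin]
  | cons y ys ih => simp [pvJoin] at ih ⊢; rw [ih, String.append_assoc]

theorem pvB_foldl (r : List String) (acc : List String) (p : String) :
    (r.foldl (fun (st : List String × String) c => (st.1 ++ [c ++ st.2], c ++ st.2)) (acc, p)).1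
      = acc ++ pvAux r p := by
  induction r generalizing acc p with
  | nil => simp [pvAux]
  | cons x xs ih => simp [List.foldl_cons, pvAux, ih]

theorem pvAux_eq (r : List String) (p : String) :
    pvAux r p = (List.range r.length).map (fun k => pvJoin ((r.take (k + 1)).reverse) ++ p) := by
  induction r generalizing p with
  | nil => simp [pvAux]
  | cons x xs ih =>
    simp only [pvAux, ih, List.length_cons, List.range_succ_eq_map, List.map_cons,
      List.map_map]
    refine List.cons_eq_cons.mpr ⟨by simp [pvJoin], ?_⟩
    apply List.map_congr_left
    intro k _
    simp only [Function.comp, Nat.succ_eq_add_one]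
    rw [List.take_succ_cons, List.reverse_cons, pvJoin_append_singleton,
      String.append_assoc]

theorem pv_inner_eq (l : List String) (k : Nat) (hk : k ≤ l.length) :
    (PySem.List.pyRange 0 (k : Int) 1).foldl
      (fun pfx j => PySem.List.pyGetD l (-j - 1) "" ++ pfx) ""
      = pvJoin (l.drop (l.length - k)) := by
  induction k with
  | zero => simp [PySem.List.pyRange_one_eq_nil, pvJoin]
  | succ k ih =>
    have h1 : ((k + 1 : Nat) : Int) = (k : Int) + 1 := by push_cast; ring
    rw [h1, PySem.List.pyRange_one_succ_right (by positivity), List.foldl_append]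
    rw [ih (by omega)]
    simp only [List.foldl_cons, List.foldl_nil]
    have hneg : -(k : Int) - 1 = -((k + 1 : Nat) : Int) := by push_cast; ring
    rw [hneg, PySem.List.pyGetD_neg_natCast l (k + 1) "" (by omega) (by omega)]
    have hlt : l.length - (k + 1) < l.length := by omega
    rw [List.drop_eq_getElem_cons hlt]
    have h2 : l.length - (k + 1) + 1 = l.length - k := by omega
    rw [h2]
    rfl

theorem pv_take_rev (l : List String) (n : Nat) :
    (l.reverse.take n).reverse = l.drop (l.length - n) := by
  simp [List.take_reverse]

-- ===== VERDICT (by name: the statement is the Claim_ definition above) =====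
theorem prefixesFromDeque_spec : Claim_equal_prefixesFromDeque := by
  intro l _
  show prefixesFromDeque l = prefixesFromDeque_alt l
  unfold prefixesFromDeque prefixesFromDeque_alt
  rw [pvB_foldl, pvAux_eq]
  rw [PySem.List.foldl_append_singleton_eq_map]
  rw [show ((l.length : Int) + 1) = ((l.length + 1 : Nat) : Int) by push_cast; ring]
  rw [PySem.List.pyRange_one]
  simp only [Int.sub_zero, Int.toNat_natCast, List.map_map, List.length_reverse,
    List.nil_append]
  rw [List.range_succ_eq_map]
  simp only [List.map_cons, List.map_map, List.singleton_append]
  refine List.cons_eq_cons.mpr ⟨?_, ?_⟩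
  · simp
  · apply List.map_congr_left
    intro k hk
    have hk' : k + 1 ≤ l.length := List.mem_range.mp hk
    simp only [Function.comp, Nat.succ_eq_add_one]
    rw [zero_add]
    rw [pv_inner_eq l (k + 1) hk', pv_take_rev, String.append_empty]
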